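-- pv_equiv track=rewrite | github.com/andrebrito16/python-academy | 8. dicionarios/bingo.py | define_vencedores
-- ===== SOURCE A (Python) =====
-- def define_vencedores(numeros_sorteados, cartelas):
--   mais_pontos_marcados = 0
--   lista_jogadores_mais_marcaram = []
--   for v in cartelas.values():
--     pontos_jogador = 0
--     for n in v:
--       if n in numeros_sorteados:
--         pontos_jogador += 1
--     if pontos_jogador > mais_pontos_marcados:
--       mais_pontos_marcados = pontos_jogador
--
--   if mais_pontos_marcados == 0:
--     return list(cartelas.keys())
--
--   # Percorre tudo de novo e appenda os jogadores que marcaram mais pontos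
--   for k, v in cartelas.items():
--     pontos_jogador = 0
--     for n in v:
--       if n in numeros_sorteados:
--         pontos_jogador += 1
--     if pontos_jogador == mais_pontos_marcados:
--       lista_jogadores_mais_marcaram.append(k)
--
--   return lista_jogadores_mais_marcaram
-- ===== SOURCE B (Python) =====
-- def define_vencedores(numeros_sorteados, cartelas):
--   # one pass: bucket players by their marked count, then read off the top bucket
--   buckets = {}
--   for k, v in cartelas.items():
--     c = sum(n in numeros_sorteados for n in v)
--     buckets.setdefault(c, []).append(k)
--   if not buckets:
--     return []
--   return buckets[max(buckets)]
-- ===== Notes on version B (the rewrite author's own statement) =====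
-- stated objective: simpler
-- what changed: Replaces A's three scans (running-max pass, explicit ==0 special case returning all keys, and a second full re-scoring pass) with a single pass that scores each player once and groups players into a score-to-players dict bucket, then returns the bucket of the maximum score; the zero/empty cases fall out naturally.
import Mathlib
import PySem

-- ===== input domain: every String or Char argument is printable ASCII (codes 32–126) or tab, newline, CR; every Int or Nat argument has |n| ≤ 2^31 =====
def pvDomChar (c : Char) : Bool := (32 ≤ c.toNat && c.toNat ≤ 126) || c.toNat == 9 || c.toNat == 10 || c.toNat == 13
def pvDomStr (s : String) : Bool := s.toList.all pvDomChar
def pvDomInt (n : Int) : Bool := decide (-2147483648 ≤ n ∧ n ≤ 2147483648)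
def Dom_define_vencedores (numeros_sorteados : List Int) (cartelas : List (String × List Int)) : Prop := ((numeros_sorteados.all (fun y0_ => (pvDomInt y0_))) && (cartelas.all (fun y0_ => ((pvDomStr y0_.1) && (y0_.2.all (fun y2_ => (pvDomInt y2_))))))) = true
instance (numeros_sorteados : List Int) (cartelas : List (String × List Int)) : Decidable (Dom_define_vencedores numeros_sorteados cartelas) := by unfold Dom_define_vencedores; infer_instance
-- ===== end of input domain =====

-- B replaces A's three scans (max pass, ==0 special case, second scoring pass) by one pass
-- that buckets players by score in a dict and reads off the top bucket (objective: simpler).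


-- ===== PORT A =====
def define_vencedores (numeros_sorteados : List Int) (cartelas : List (String × List Int)) : List String :=
  -- first loop: running maximum of the per-player marked counts
  let mais_pontos_marcados : Int :=
    cartelas.foldl (fun mais v =>
      let pontos_jogador : Int :=
        v.2.foldl (fun (pts : Int) n => if numeros_sorteados.contains n then pts + 1 else pts) 0
      if pontos_jogador > mais then pontos_jogador else mais) 0
  if mais_pontos_marcados = 0 then
    cartelas.map Prod.fst                      -- list(cartelas.keys())
  else
    -- second loop: re-score everyone and append the players at the maximum
    cartelas.foldl (fun acc p =>
      let pontos_jogador : Int :=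
        p.2.foldl (fun (pts : Int) n => if numeros_sorteados.contains n then pts + 1 else pts) 0
      if pontos_jogador = mais_pontos_marcados then acc ++ [p.1] else acc) []

-- ===== PORT B =====
def define_vencedores_alt (numeros_sorteados : List Int) (cartelas : List (String × List Int)) : List String :=
  -- one pass: buckets.setdefault(c, []).append(k)
  let buckets : PySem.Dict Int (List String) :=
    cartelas.foldl (fun d p =>
      let c : Int := (p.2.map (fun n => if numeros_sorteados.contains n then (1 : Int) else 0)).sum
      d.modify c [] (· ++ [p.1])) PySem.Dict.empty
  -- 'if not buckets: return []' + 'return buckets[max(buckets)]'; max? is none exactly when buckets is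
  -- empty, and max(buckets) is always a present key, so getD never falls back to its default
  match PySem.List.max? buckets.keys (fun x => x) with
  | none => []
  | some m => buckets.getD m []

-- ===== PRECONDITION & SPEC =====
def Spec_define_vencedores (numeros_sorteados : List Int) (cartelas : List (String × List Int)) (out : List String) : Prop := out = define_vencedores_alt numeros_sorteados cartelas
instance (numeros_sorteados : List Int) (cartelas : List (String × List Int)) (out : List String) : Decidable (Spec_define_vencedores numeros_sorteados cartelas out) := by unfold Spec_define_vencedores; infer_instance

-- ===== CLAIM (what is proved, stated in full; the proofs are below) =====
def Claim_equal_define_vencedores : Prop := ∀ (numeros_sorteados : List Int) (cartelas : List (String × List Int)), Dom_define_vencedores numeros_sorteados cartelas → Spec_define_vencedores numeros_sorteados cartelas (define_vencedores numeros_sorteados cartelas)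

-- ===== LEMMAS AND PROOFS =====

-- the common per-player score, as a count
def pvScore (ns : List Int) (p : String × List Int) : Int :=
  (p.2.countP (fun n => ns.contains n) : Int)

-- A's running-max loop: its result bounds every score from above, and is 0 or an attained score
lemma pv_maxif {α : Type} (f : α → Int) (l : List α) : ∀ (a : Int),
    a ≤ l.foldl (fun m p => if f p > m then f p else m) a ∧
    (∀ p ∈ l, f p ≤ l.foldl (fun m p => if f p > m then f p else m) a) ∧
    (l.foldl (fun m p => if f p > m then f p else m) a = a ∨
      ∃ p ∈ l, f p = l.foldl (fun m p => if f p > m then f p else m) a) := by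
  induction l with
  | nil => intro a; simp
  | cons x t ih =>
    intro a
    simp only [List.foldl_cons]
    by_cases h : f x > a
    · rw [if_pos h]
      obtain ⟨h1, h2, h3⟩ := ih (f x)
      refine ⟨by omega, ?_, ?_⟩
      · intro p hp
        rcases List.mem_cons.mp hp with rfl | hp
        · exact h1
        · exact h2 _ hp
      · rcases h3 with h3 | ⟨p, hp, hfp⟩
        · exact Or.inr ⟨x, List.mem_cons_self, h3.symm⟩
        · exact Or.inr ⟨p, List.mem_cons_of_mem _ hp, hfp⟩
    · rw [if_neg h]
      obtain ⟨h1, h2, h3⟩ := ih a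
      refine ⟨h1, ?_, ?_⟩
      · intro p hp
        rcases List.mem_cons.mp hp with rfl | hp
        · omega
        · exact h2 _ hp
      · rcases h3 with h3 | ⟨p, hp, hfp⟩
        · exact Or.inl h3
        · exact Or.inr ⟨p, List.mem_cons_of_mem _ hp, hfp⟩

-- a foldl max over Int is a member of k :: t
lemma pv_foldl_max_mem (t : List Int) : ∀ (k : Int), t.foldl max k = k ∨ t.foldl max k ∈ t := by
  induction t with
  | nil => intro k; simp
  | cons x t ih =>
    intro k
    simp only [List.foldl_cons]
    rcases ih (max k x) with h | h
    · rw [h]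
      rcases max_choice k x with hm | hm
      · exact Or.inl hm
      · exact Or.inr (by rw [hm]; exact List.mem_cons_self)
    · exact Or.inr (List.mem_cons_of_mem _ h)

-- max? (fun x => x) on a nonempty Int list whose members are all ≤ m with m a member returns m
lemma pv_max?_eq (K : List Int) (m : Int) (hmem : m ∈ K) (hub : ∀ x ∈ K, x ≤ m) :
    PySem.List.max? K (fun x => x) = some m := by
  cases K with
  | nil => cases hmem
  | cons k t =>
    rw [PySem.List.max?_id_cons]
    congr 1
    obtain ⟨hk, hall⟩ := PySem.List.le_foldl_max t k
    have hle : t.foldl max k ≤ m := by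
      rcases pv_foldl_max_mem t k with h | h
      · rw [h]; exact hub k List.mem_cons_self
      · exact hub _ (List.mem_cons_of_mem _ h)
    have hge : m ≤ t.foldl max k := by
      rcases List.mem_cons.mp hmem with rfl | hm
      · exact hk
      · exact hall _ hm
    omega

-- scores are nonnegative
lemma pv_score_nonneg (ns : List Int) (p : String × List Int) :
    (0 : Int) ≤ (p.2.countP (fun n => ns.contains n) : Int) := by positivity

theorem define_vencedores_spec_aux (ns : List Int) (l : List (String × List Int)) :
    define_vencedores ns l = define_vencedores_alt ns l := by
  -- both inner scoring computations are the same count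
  have hinner : ∀ v : List Int,
      v.foldl (fun (pts : Int) n => if ns.contains n then pts + 1 else pts) 0 =
        (v.countP (fun n => ns.contains n) : Int) := by
    intro v
    rw [PySem.List.foldl_if_add_one (fun n => ns.contains n) v 0]
    omega
  have hinner2 : ∀ v : List Int,
      (v.map (fun n => if ns.contains n then (1 : Int) else 0)).sum =
        (v.countP (fun n => ns.contains n) : Int) := by
    intro v
    exact PySem.List.sum_map_ite_one_zero (fun n => ns.contains n) v
  simp only [define_vencedores, define_vencedores_alt, hinner, hinner2]
  -- the bucket dict's key list is the set of scores
  rw [PySem.Dict.keys_foldl_modify_key l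
    (fun p => ((p.2.countP (fun n => ns.contains n) : Nat) : Int)) []
    (fun _ p => (· ++ [p.1])) PySem.Dict.empty]
  have hupd : PySem.Set.update ((PySem.Dict.empty : PySem.Dict Int (List String)).keys)
      (l.map (fun p => ((p.2.countP (fun n => ns.contains n) : Nat) : Int)))
      = PySem.Set.ofList (l.map (fun p => ((p.2.countP (fun n => ns.contains n) : Nat) : Int))) := by
    rw [PySem.Dict.keys_empty, PySem.Set.ofList_eq_foldl]; rfl
  rw [hupd]
  -- the bucket stored under any key c is the players scoring c, in order
  have hget : ∀ c : Int,
      (l.foldl (fun d p =>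
        d.modify ((p.2.countP (fun n => ns.contains n) : Nat) : Int) [] (· ++ [p.1]))
        (PySem.Dict.empty : PySem.Dict Int (List String))).getD c [] =
      (l.filter (fun p => ((p.2.countP (fun n => ns.contains n) : Nat) : Int) == c)).map Prod.fst := by
    intro c
    have h := PySem.Dict.getD_foldl_modify_append
      (l.map (fun p => (((p.2.countP (fun n => ns.contains n) : Nat) : Int), p.1)))
      (PySem.Dict.empty : PySem.Dict Int (List String)) c
    simp only [List.foldl_map] at h
    rw [h, PySem.Dict.getD_empty, List.nil_append, List.filter_map, List.map_map]
    rfl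
  cases l with
  | nil => rfl
  | cons q t =>
    -- facts about A's running maximum M
    obtain ⟨hM0, hMub, hMat⟩ := pv_maxif
      (fun p => ((p.2.countP (fun n => ns.contains n) : Nat) : Int)) (q :: t) 0
    set M : Int := (q :: t).foldl
      (fun m p => if ((p.2.countP (fun n => ns.contains n) : Nat) : Int) > m
        then ((p.2.countP (fun n => ns.contains n) : Nat) : Int) else m) 0 with hMdef
    -- M is a member of the score set and an upper bound of it
    have hMmem : M ∈ PySem.Set.ofList
        ((q :: t).map (fun p => ((p.2.countP (fun n => ns.contains n) : Nat) : Int))) := by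
      rw [PySem.Set.mem_ofList]
      rcases hMat with h0 | ⟨p, hp, hfp⟩
      · have hq := hMub q List.mem_cons_self
        have hq0 := pv_score_nonneg ns q
        exact List.mem_map.mpr ⟨q, List.mem_cons_self, by omega⟩
      · exact List.mem_map.mpr ⟨p, hp, hfp⟩
    have hMub' : ∀ x ∈ PySem.Set.ofList
        ((q :: t).map (fun p => ((p.2.countP (fun n => ns.contains n) : Nat) : Int))), x ≤ M := by
      intro x hx
      rw [PySem.Set.mem_ofList] at hx
      obtain ⟨p, hp, rfl⟩ := List.mem_map.mp hx
      exact hMub p hp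
    rw [pv_max?_eq _ M hMmem hMub']
    simp only [hget]
    by_cases h0 : M = 0
    · rw [if_pos h0]
      have hall : ∀ p ∈ (q :: t),
          (((p.2.countP (fun n => ns.contains n) : Nat) : Int) == M) = true := by
        intro p hp
        have h1 := hMub p hp
        have h2 := pv_score_nonneg ns p
        simp only [beq_iff_eq]; omega
      rw [List.filter_eq_self.mpr hall]
    · rw [if_neg h0]
      rw [PySem.List.foldl_append_ite
        (p := fun pr : String × List Int =>
          ((List.countP (fun n => ns.contains n) pr.2 : Nat) : Int) = M)
        (f := Prod.fst)]
      rw [List.nil_append]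
      exact congrArg (List.map Prod.fst) (List.filter_congr (by intro p _; simp [beq_eq_decide]))

-- ===== VERDICT (by name: the statement is the Claim_ definition above) =====
theorem define_vencedores_spec : Claim_equal_define_vencedores := by
  intro ns l _
  unfold Spec_define_vencedores
  exact define_vencedores_spec_aux ns l
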